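-- pv_equiv track=rewrite | github.com/ZeVicTech/Algorithm | 프로그래머스/lv2/77885. 2개 이하로 다른 비트/2개 이하로 다른 비트.py | solution
-- ===== SOURCE A (Python) =====
-- def solution(numbers):
--     answer = []
--     for i in range(len(numbers)):
--         x = numbers[i]
--         target = 1
--         while True:
--             if x%2 == 0:
--                 if target == 1:
--                     answer.append(numbers[i]+target)
--                 else:
--                     answer.append(numbers[i]+target-target//2)
--                 break
--             x = x//2
--             target *= 2
--
--     return answer
-- ===== SOURCE B (Python) =====
-- def solution(numbers):
--     def fix(x):
--         low = ~x & (x + 1)          # 2**p where p = lowest zero-bit position of x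
--         return x + 1 if low == 1 else x + low // 2
--     return [fix(x) for x in numbers]
-- ===== Notes on version B (the rewrite author's own statement) =====
-- stated objective: alternative
-- what changed: replaces A's per-number bit-scanning while loop (halving x and doubling target) with the closed-form bit expression low = ~x & (x+1), appending x+1 when low == 1 and x + low//2 otherwise
-- outside the precondition, e.g. on solution([-1]): A does not finish within the time limit, B returns [-1]
import Mathlib
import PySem

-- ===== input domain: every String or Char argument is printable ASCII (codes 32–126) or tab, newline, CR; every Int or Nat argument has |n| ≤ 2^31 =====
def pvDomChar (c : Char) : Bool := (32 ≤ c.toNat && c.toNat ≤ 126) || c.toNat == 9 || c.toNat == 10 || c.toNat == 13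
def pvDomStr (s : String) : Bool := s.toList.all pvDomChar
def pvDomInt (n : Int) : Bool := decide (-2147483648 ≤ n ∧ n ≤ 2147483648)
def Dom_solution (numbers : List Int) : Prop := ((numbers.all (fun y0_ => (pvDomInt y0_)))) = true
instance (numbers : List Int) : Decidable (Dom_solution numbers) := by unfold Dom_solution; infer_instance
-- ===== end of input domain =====

-- B replaces A's per-number bit-scanning while loop by the closed-form lowest-zero-bit
-- expression ~x & (x+1) (objective: alternative, loop-free per element).

-- ===== PORT A =====
-- A's inner 'while True' loop; 'fuel' only makes the recursion total (it is never
-- exhausted when x ≠ -1 and fuel > |x|, which holds at the call site below under Pre_).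
def pvLoopA (fuel : Nat) (orig x target : Int) : Int :=
  match fuel with
  | 0 => 0
  | fuel + 1 =>
    if PySem.Int.mod x 2 = 0 then
      if target = 1 then orig + target
      else orig + target - PySem.Int.floordiv target 2
    else pvLoopA fuel orig (PySem.Int.floordiv x 2) (target * 2)

def solution (numbers : List Int) : List Int :=
  numbers.foldl (fun answer x => answer ++ [pvLoopA (x.natAbs + 1) x x 1]) []

-- ===== PORT B =====
-- low = ~x & (x + 1)  (Source B's helper expression)
def pvLow (x : Int) : Int := PySem.Int.band (Int.not x) (x + 1)

def solution_alt (numbers : List Int) : List Int :=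
  numbers.map (fun x =>
    if pvLow x = 1 then x + 1 else x + PySem.Int.floordiv (pvLow x) 2)

-- ===== PRECONDITION & SPEC =====
-- Pre_ excludes lists containing -1: on those A's while loop never terminates
-- (x // 2 == -1 keeps x = -1 forever), so A returns on no excluded input.
def Pre_solution (numbers : List Int) : Prop := (-1 : Int) ∉ numbers
instance (numbers : List Int) : Decidable (Pre_solution numbers) := by unfold Pre_solution; infer_instance
def pvWitness_solution : List Int := [0, 1, 6, -3, 7]

def Spec_solution (numbers : List Int) (out : List Int) : Prop := out = solution_alt numbers
instance (numbers : List Int) (out : List Int) : Decidable (Spec_solution numbers out) := by unfold Spec_solution; infer_instance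

-- ===== CLAIM (what is proved, stated in full; the proofs are below) =====
def Claim_equal_solution : Prop := ∀ (numbers : List Int), Dom_solution numbers → Pre_solution numbers → Spec_solution numbers (solution numbers)

-- ===== LEMMAS AND PROOFS =====

theorem pv_not_eq (y : Int) : Int.not y = -y - 1 := by
  cases y with
  | ofNat n => rw [show Int.not (Int.ofNat n) = Int.negSucc n from rfl, Int.negSucc_eq]; simp [Int.ofNat_eq_natCast]; omega
  | negSucc n => rw [show Int.not (Int.negSucc n) = Int.ofNat n from rfl, Int.negSucc_eq]; simp [Int.ofNat_eq_natCast]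

theorem pv_nat_and_mod2 (m n : Nat) : (m &&& n) % 2 = if m % 2 = 1 ∧ n % 2 = 1 then 1 else 0 := by
  have h := @Nat.and_mod_two_eq_one m n
  split <;> omega

-- Halving identity for Python's & : band a b = (1 if both odd else 0) + 2 * band (a/2) (b/2).
theorem pv_band_halving (a b : Int) :
    PySem.Int.band a b =
      (if a % 2 = 1 ∧ b % 2 = 1 then 1 else 0) + 2 * PySem.Int.band (a / 2) (b / 2) := by
  by_cases ha : 0 ≤ a <;> by_cases hb : 0 ≤ b
  · have ha2 : 0 ≤ a / 2 := by omega
    have hb2 : 0 ≤ b / 2 := by omega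
    simp only [PySem.Int.band, if_pos ha, if_pos hb, if_pos ha2, if_pos hb2]
    have e1 : (a / 2).toNat = a.toNat / 2 := by omega
    have e2 : (b / 2).toNat = b.toNat / 2 := by omega
    rw [e1, e2]
    have h1 := @Nat.and_div_two a.toNat b.toNat
    have h2 := pv_nat_and_mod2 a.toNat b.toNat
    have h3 := @Nat.and_le_left a.toNat b.toNat
    have h4 := @Nat.and_le_left (a.toNat/2) (b.toNat/2)
    split_ifs at h2 ⊢ <;> omega
  · have ha2 : 0 ≤ a / 2 := by omega
    have hb2 : ¬ 0 ≤ b / 2 := by omega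
    simp only [PySem.Int.band, if_pos ha, if_neg hb, if_pos ha2, if_neg hb2]
    have e1 : (a / 2).toNat = a.toNat / 2 := by omega
    have e2 : (-(b / 2) - 1).toNat = (-b - 1).toNat / 2 := by omega
    rw [e1, e2]
    have h1 := @Nat.and_div_two a.toNat (-b-1).toNat
    have h2 := pv_nat_and_mod2 a.toNat (-b-1).toNat
    have h3 := @Nat.and_le_left a.toNat (-b-1).toNat
    have h4 := @Nat.and_le_left (a.toNat/2) ((-b-1).toNat/2)
    split_ifs at h2 ⊢ <;> omega
  · have ha2 : ¬ 0 ≤ a / 2 := by omega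
    have hb2 : 0 ≤ b / 2 := by omega
    simp only [PySem.Int.band, if_neg ha, if_pos hb, if_neg ha2, if_pos hb2]
    have e1 : (b / 2).toNat = b.toNat / 2 := by omega
    have e2 : (-(a / 2) - 1).toNat = (-a - 1).toNat / 2 := by omega
    rw [e1, e2]
    have h1 := @Nat.and_div_two b.toNat (-a-1).toNat
    have h2 := pv_nat_and_mod2 b.toNat (-a-1).toNat
    have h3 := @Nat.and_le_left b.toNat (-a-1).toNat
    have h4 := @Nat.and_le_left (b.toNat/2) ((-a-1).toNat/2)
    split_ifs at h2 ⊢ <;> omega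
  · have ha2 : ¬ 0 ≤ a / 2 := by omega
    have hb2 : ¬ 0 ≤ b / 2 := by omega
    simp only [PySem.Int.band, if_neg ha, if_neg hb, if_neg ha2, if_neg hb2]
    have e1 : (-(a / 2) - 1).toNat = (-a - 1).toNat / 2 := by omega
    have e2 : (-(b / 2) - 1).toNat = (-b - 1).toNat / 2 := by omega
    rw [e1, e2]
    have h1 := @Nat.or_div_two (-a-1).toNat (-b-1).toNat
    have h2 := @Nat.or_mod_two_eq_one (-a-1).toNat (-b-1).toNat
    have h5 : ((-a-1).toNat ||| (-b-1).toNat) % 2 = 0 ∨ ((-a-1).toNat ||| (-b-1).toNat) % 2 = 1 := by omega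
    split_ifs at h2 ⊢ <;> omega

-- ~y & y = 0.
theorem pv_band_not_self (y : Int) : PySem.Int.band (Int.not y) y = 0 := by
  induction hn : y.natAbs using Nat.strong_induction_on generalizing y with
  | _ n ih =>
    rcases eq_or_ne y 0 with rfl | h0
    · decide
    rcases eq_or_ne y (-1) with rfl | h1
    · decide
    have key := pv_band_halving (Int.not y) y
    have hnot : Int.not y = -y - 1 := pv_not_eq y
    have hpar : ¬ ((Int.not y) % 2 = 1 ∧ y % 2 = 1) := by rw [pv_not_eq]; omega
    have hdiv : (Int.not y) / 2 = Int.not (y / 2) := by rw [pv_not_eq, pv_not_eq]; omega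
    rw [if_neg hpar, hdiv] at key
    have hlt : (y / 2).natAbs < n := by omega
    rw [ih _ hlt (y / 2) rfl] at key
    omega

-- x even → the lowest-zero-bit value is 1.
theorem pvLow_even (x : Int) (h : x % 2 = 0) : pvLow x = 1 := by
  unfold pvLow
  have key := pv_band_halving (Int.not x) (x + 1)
  have hpar : (Int.not x) % 2 = 1 ∧ (x + 1) % 2 = 1 := by rw [pv_not_eq]; omega
  have hd1 : (Int.not x) / 2 = Int.not (x / 2) := by rw [pv_not_eq, pv_not_eq]; omega
  have hd2 : (x + 1) / 2 = x / 2 := by omega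
  rw [if_pos hpar, hd1, hd2, pv_band_not_self] at key
  omega

-- x odd → low x = 2 * low (x // 2).
theorem pvLow_odd (x : Int) (h : x % 2 = 1) : pvLow x = 2 * pvLow (x / 2) := by
  unfold pvLow
  have key := pv_band_halving (Int.not x) (x + 1)
  have hpar : ¬ ((Int.not x) % 2 = 1 ∧ (x + 1) % 2 = 1) := by rw [pv_not_eq]; omega
  have hd1 : (Int.not x) / 2 = Int.not (x / 2) := by rw [pv_not_eq, pv_not_eq]; omega
  have hd2 : (x + 1) / 2 = x / 2 + 1 := by omega
  rw [if_neg hpar, hd1, hd2] at key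
  omega

-- Loop invariant: with target = 2^j and enough fuel, A's loop computes B's closed form.
theorem pvLoopA_inv (fuel : Nat) :
    ∀ (x : Int), x ≠ -1 → x.natAbs < fuel → ∀ (orig : Int) (j : Nat),
      pvLoopA fuel orig x (2 ^ j) =
        if j = 0 ∧ pvLow x = 1 then orig + 1 else orig + (2 ^ j * pvLow x) / 2 := by
  induction fuel with
  | zero => intro x _ h; omega
  | succ fuel ih =>
    intro x hx hf orig j
    have hmod : PySem.Int.mod x 2 = x % 2 := PySem.Int.mod_eq_emod_of_pos (by omega)
    have hfd : PySem.Int.floordiv x 2 = x / 2 := PySem.Int.floordiv_eq_ediv_of_pos (by omega)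
    by_cases he : x % 2 = 0
    · have hlow := pvLow_even x he
      rw [pvLoopA, hmod, if_pos he]
      rcases Nat.eq_zero_or_pos j with rfl | hj
      · simp [hlow]
      · have hj1 : (2:Int) ^ j ≠ 1 := by
          have : (2:Int) ^ 1 ∣ 2 ^ j := pow_dvd_pow 2 hj
          intro h; rw [h] at this; omega
        rw [if_neg hj1, if_neg (by simp [hlow]; omega)]
        have hfd2 : PySem.Int.floordiv (2 ^ j) 2 = 2 ^ j / 2 := PySem.Int.floordiv_eq_ediv_of_pos (by omega)
        rw [hfd2, hlow]
        obtain ⟨j', rfl⟩ : ∃ j', j = j' + 1 := ⟨j - 1, by omega⟩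
        rw [pow_succ]
        have h2 : (2:Int) ^ j' * 2 / 2 = 2 ^ j' := Int.mul_ediv_cancel _ (by omega)
        rw [mul_one, h2]
        ring
    · have ho : x % 2 = 1 := by omega
      have hlow := pvLow_odd x ho
      have hne : x / 2 ≠ -1 := by omega
      have hlt : (x / 2).natAbs < fuel := by omega
      rw [pvLoopA, hmod, if_neg (by omega), hfd]
      have : (2:Int) ^ j * 2 = 2 ^ (j + 1) := by rw [pow_succ]
      rw [this, ih (x / 2) hne hlt orig (j + 1)]
      rw [if_neg (by omega)]
      have hlow1 : pvLow x ≠ 1 := by omega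
      rw [if_neg (by simp [hlow1])]
      rw [hlow, pow_succ]
      ring_nf

-- Per-element agreement of A's loop with B's closed form (x ≠ -1).
theorem pv_elem (x : Int) (hx : x ≠ -1) :
    pvLoopA (x.natAbs + 1) x x 1 =
      if pvLow x = 1 then x + 1 else x + PySem.Int.floordiv (pvLow x) 2 := by
  have h := pvLoopA_inv (x.natAbs + 1) x hx (by omega) x 0
  simp only [pow_zero, one_mul] at h
  rw [h, PySem.Int.floordiv_eq_ediv_of_pos (by omega : (0:Int) < 2)]
  simp

-- ===== VERDICT (by name: the statement is the Claim_ definition above) =====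
theorem solution_spec : Claim_equal_solution := by
  intro numbers _ hpre
  unfold Spec_solution solution solution_alt
  rw [PySem.List.foldl_append_singleton_eq_map]
  exact List.map_congr_left (fun x hx => pv_elem x (fun he => hpre (he ▸ hx)))
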